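-- pv_equiv track=rewrite | github.com/xanderxue/partialSHIC | convert_to_FVs_empirical.py | getSubWinBounds
-- ===== SOURCE A (Python) =====
-- def getSubWinBounds(subWinSize,positions):
--   subWinStart=1
--   subWinEnd=subWinStart+subWinSize-1
--   subWinBounds=[]
--   for i in range(len(positions)):
--     while not (positions[i]>=subWinStart and positions[i]<=subWinEnd):
--       subWinStart+=subWinSize
--       subWinEnd+=subWinSize
--     if (subWinStart,subWinEnd) not in subWinBounds:
--       subWinBounds.append((subWinStart,subWinEnd))
--   return subWinBounds
-- ===== SOURCE B (Python) =====
-- def getSubWinBounds(subWinSize, positions):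
--   seen = set()
--   bounds = []
--   for p in positions:
--     k = (p - 1) // subWinSize
--     if k not in seen:
--       seen.add(k)
--       bounds.append((k * subWinSize + 1, (k + 1) * subWinSize))
--   return bounds
-- ===== Notes on version B (the rewrite author's own statement) =====
-- stated objective: alternative
-- what changed: B computes each position's window index directly by integer division and dedups with a set in one pass, instead of A's step-by-step while-loop window advance plus a linear 'not in list' membership scan per position.
import Mathlib
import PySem

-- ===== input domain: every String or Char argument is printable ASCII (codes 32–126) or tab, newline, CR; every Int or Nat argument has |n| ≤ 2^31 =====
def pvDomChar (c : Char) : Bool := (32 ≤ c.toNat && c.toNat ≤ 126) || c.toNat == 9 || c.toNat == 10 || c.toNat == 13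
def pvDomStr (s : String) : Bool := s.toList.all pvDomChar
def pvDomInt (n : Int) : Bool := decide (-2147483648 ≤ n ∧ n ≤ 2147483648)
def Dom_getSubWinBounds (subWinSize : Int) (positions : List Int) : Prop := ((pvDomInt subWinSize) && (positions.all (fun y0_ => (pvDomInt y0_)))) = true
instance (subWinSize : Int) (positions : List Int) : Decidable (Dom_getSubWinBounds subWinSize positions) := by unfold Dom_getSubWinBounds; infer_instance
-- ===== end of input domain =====

-- B replaces A's step-by-step window advance plus per-position linear list-membership scan by a
-- direct integer-division window index with a set for dedup, in one pass (neither version mutates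
-- its arguments).

-- ===== PORT A =====
-- the 'while not (p>=start and p<=end)' loop; the fuel only bounds iterations (the loop runs at
-- most p-start steps whenever it terminates), it never changes the computed value
def pvAdvance (s p st en : Int) : Nat → Int × Int
  | 0 => (st, en)
  | Nat.succ f => if ¬(p ≥ st ∧ p ≤ en) then pvAdvance s p (st + s) (en + s) f else (st, en)

def pvLoopA (s : Int) : List Int → Int × Int → List (List Int) → List (List Int)
  | [], _, bounds => bounds
  | p :: ps, sten, bounds =>
    let r := pvAdvance s p sten.1 sten.2 ((p - sten.1).toNat + 1)
    let bounds' := if [r.1, r.2] ∈ bounds then bounds else bounds ++ [[r.1, r.2]]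
    pvLoopA s ps r bounds'

def getSubWinBounds (subWinSize : Int) (positions : List Int) : List (List Int) :=
  pvLoopA subWinSize positions (1, 1 + subWinSize - 1) []

-- ===== PORT B =====
def pvLoopB (s : Int) : List Int → PySem.Set Int → List (List Int) → List (List Int)
  | [], _, bounds => bounds
  | p :: ps, seen, bounds =>
    let k := PySem.Int.floordiv (p - 1) s
    if k ∈ seen then pvLoopB s ps seen bounds
    else pvLoopB s ps (PySem.Set.add seen k) (bounds ++ [[k * s + 1, (k + 1) * s]])

def getSubWinBounds_alt (subWinSize : Int) (positions : List Int) : List (List Int) :=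
  pvLoopB subWinSize positions PySem.Set.empty []

-- ===== PRECONDITION & SPEC =====
-- Pre_ is exactly where the Python A terminates (A raises nothing but loops forever otherwise):
-- A's window only ever moves forward, so it diverges as soon as some position lies before the
-- current window (a position < 1, a non-positive subWinSize with a nonempty list, or a position
-- whose window index drops below an earlier position's window index).
def Pre_getSubWinBounds (subWinSize : Int) (positions : List Int) : Prop :=
  positions = [] ∨
    (1 ≤ subWinSize ∧ (∀ p ∈ positions, 1 ≤ p) ∧
      ∀ pr ∈ positions.zip positions.tail,
        PySem.Int.floordiv (pr.1 - 1) subWinSize ≤ PySem.Int.floordiv (pr.2 - 1) subWinSize)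
instance (subWinSize : Int) (positions : List Int) : Decidable (Pre_getSubWinBounds subWinSize positions) := by unfold Pre_getSubWinBounds; infer_instance
def pvWitness_getSubWinBounds : Int × List Int := (10, [3, 7, 12, 25, 25])

def Spec_getSubWinBounds (subWinSize : Int) (positions : List Int) (out : List (List Int)) : Prop := out = getSubWinBounds_alt subWinSize positions
instance (subWinSize : Int) (positions : List Int) (out : List (List Int)) : Decidable (Spec_getSubWinBounds subWinSize positions out) := by unfold Spec_getSubWinBounds; infer_instance

-- ===== CLAIM (what is proved, stated in full; the proofs are below) =====
def Claim_equal_getSubWinBounds : Prop := ∀ (subWinSize : Int) (positions : List Int), Dom_getSubWinBounds subWinSize positions → Pre_getSubWinBounds subWinSize positions → Spec_getSubWinBounds subWinSize positions (getSubWinBounds subWinSize positions)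

-- ===== LEMMAS AND PROOFS =====

lemma pv_fd_nonneg (s x : Int) (hs : 1 ≤ s) (hx : 0 ≤ x) : 0 ≤ PySem.Int.floordiv x s := by
  rw [PySem.Int.le_floordiv_iff_mul_le (by omega)]
  simpa using hx

lemma pv_fd_mul_le (s x : Int) (hs : 1 ≤ s) : PySem.Int.floordiv x s * s ≤ x := by
  rw [← PySem.Int.le_floordiv_iff_mul_le (by omega)]

lemma pv_advance_correct (s p : Int) (hs : 1 ≤ s) : ∀ (fuel : Nat) (j : Int),
    j * s + 1 ≤ p → (p - (j * s + 1)).toNat < fuel →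
    pvAdvance s p (j * s + 1) (j * s + s) fuel =
      ((PySem.Int.floordiv (p - 1) s) * s + 1, (PySem.Int.floordiv (p - 1) s) * s + s) := by
  intro fuel
  induction fuel with
  | zero => intro j h1 h2; omega
  | succ f ih =>
    intro j h1 h2
    by_cases h : p ≤ j * s + s
    · have hk : PySem.Int.floordiv (p - 1) s = j := by
        rw [PySem.Int.floordiv_eq_iff_of_pos (by omega)]
        have e3 : (j + 1) * s = j * s + s := by ring
        rw [e3]
        omega
      simp [pvAdvance, hk]
      omega
    · have hstep : pvAdvance s p (j * s + 1) (j * s + s) (f + 1)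
          = pvAdvance s p (j * s + 1 + s) (j * s + s + s) f := by
        simp [pvAdvance]
        omega
      rw [hstep]
      have e1 : j * s + 1 + s = (j + 1) * s + 1 := by ring
      have e2 : j * s + s + s = (j + 1) * s + s := by ring
      rw [e1, e2]
      have e3 : (j + 1) * s = j * s + s := by ring
      exact ih (j + 1) (by rw [e3]; omega) (by rw [e3]; omega)

lemma pv_loop_eq (s : Int) (hs : 1 ≤ s) : ∀ (ps : List Int) (j : Int) (bounds : List (List Int)) (seen : PySem.Set Int),
    (∀ p ∈ ps, 1 ≤ p) →
    (∀ pr ∈ ps.zip ps.tail, PySem.Int.floordiv (pr.1 - 1) s ≤ PySem.Int.floordiv (pr.2 - 1) s) →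
    (∀ q, ps.head? = some q → j ≤ PySem.Int.floordiv (q - 1) s) →
    (∀ k : Int, [k * s + 1, k * s + s] ∈ bounds ↔ k ∈ seen) →
    pvLoopA s ps (j * s + 1, j * s + s) bounds = pvLoopB s ps seen bounds := by
  intro ps
  induction ps with
  | nil => intro j bounds seen _ _ _ _; rfl
  | cons p ps ih =>
    intro j bounds seen hpos hchain hhead hinv
    have hp1 : 1 ≤ p := hpos p (by simp)
    set k := PySem.Int.floordiv (p - 1) s with hk
    have hjk : j ≤ k := hhead p rfl
    have hks : k * s ≤ p - 1 := pv_fd_mul_le s (p - 1) hs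
    have hjs : j * s ≤ k * s := mul_le_mul_of_nonneg_right hjk (by omega)
    have hjp : j * s + 1 ≤ p := by omega
    have hadv : pvAdvance s p (j * s + 1) (j * s + s) ((p - (j * s + 1)).toNat + 1)
        = (k * s + 1, k * s + s) :=
      pv_advance_correct s p hs _ j hjp (by omega)
    have hchain' : ∀ pr ∈ ps.zip ps.tail,
        PySem.Int.floordiv (pr.1 - 1) s ≤ PySem.Int.floordiv (pr.2 - 1) s := by
      intro pr hpr
      apply hchain
      cases ps with
      | nil => simp at hpr
      | cons q qs => simpa using Or.inr hpr
    have hhead' : ∀ q, ps.head? = some q → k ≤ PySem.Int.floordiv (q - 1) s := by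
      intro q hq
      cases ps with
      | nil => simp at hq
      | cons r rs =>
        obtain rfl : r = q := by simpa using hq
        exact hchain (p, r) (by simp)
    have hpos' : ∀ q ∈ ps, 1 ≤ q := fun q hq => hpos q (by simp [hq])
    have hmemiff := hinv k
    by_cases hmem : [k * s + 1, k * s + s] ∈ bounds
    · have hseen : k ∈ seen := hmemiff.mp hmem
      rw [show pvLoopA s (p :: ps) (j * s + 1, j * s + s) bounds
            = pvLoopA s ps (k * s + 1, k * s + s) bounds by
          simp [pvLoopA, hadv, hmem]]
      rw [show pvLoopB s (p :: ps) seen bounds = pvLoopB s ps seen bounds by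
          simp [pvLoopB, ← hk, hseen]]
      exact ih k bounds seen hpos' hchain' hhead' hinv
    · have hseen : k ∉ seen := fun h => hmem (hmemiff.mpr h)
      have e3 : (k + 1) * s = k * s + s := by ring
      have hB : pvLoopB s (p :: ps) seen bounds
          = pvLoopB s ps (seen ++ [k]) (bounds ++ [[k * s + 1, k * s + s]]) := by
        simp [pvLoopB, ← hk, hseen, e3]
      rw [show pvLoopA s (p :: ps) (j * s + 1, j * s + s) bounds
            = pvLoopA s ps (k * s + 1, k * s + s) (bounds ++ [[k * s + 1, k * s + s]]) by
          simp [pvLoopA, hadv, hmem]]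
      rw [hB]
      apply ih k _ _ hpos' hchain' hhead'
      intro k'
      constructor
      · intro h
        rcases List.mem_append.mp h with h | h
        · exact List.mem_append.mpr (Or.inl ((hinv k').mp h))
        · have h' := List.mem_singleton.mp h
          simp only [List.cons.injEq, and_true] at h'
          have h1 : k' * s = k * s := by omega
          have : k' = k := mul_right_cancel₀ (show s ≠ 0 by omega) h1
          exact List.mem_append.mpr (Or.inr (by simp [this]))
      · intro h
        rcases List.mem_append.mp h with h | h
        · exact List.mem_append.mpr (Or.inl ((hinv k').mpr h))
        · simp [List.mem_singleton.mp h]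

-- ===== VERDICT (by name: the statement is the Claim_ definition above) =====
theorem getSubWinBounds_spec : Claim_equal_getSubWinBounds := by
  unfold Claim_equal_getSubWinBounds
  intro s ps _ hpre
  unfold Spec_getSubWinBounds
  rcases hpre with h | ⟨hs, hpos, hchain⟩
  · subst h; rfl
  · unfold getSubWinBounds getSubWinBounds_alt
    have e1 : ((1 : Int), 1 + s - 1) = (0 * s + 1, 0 * s + s) := by
      rw [Prod.ext_iff]; exact ⟨by ring, by ring⟩
    rw [e1]
    refine pv_loop_eq s hs ps 0 [] PySem.Set.empty hpos hchain ?_ ?_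
    · intro q hq
      cases ps with
      | nil => simp at hq
      | cons r rs =>
        obtain rfl : r = q := by simpa using hq
        exact pv_fd_nonneg s (r - 1) hs (by have := hpos r (by simp); omega)
    · intro k
      simp [PySem.Set.empty]
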